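-- pv_equiv track=rewrite | github.com/AYMAN-070/A--MAZE-ING | terminal_rendering.py | decode_cell
-- ===== SOURCE A (Python) =====
-- from typing import List, Dict, Any
--
-- def decode_cell(carac: str) -> List[int]:
--     """Return a list with the four wall values
--     unpackable with WEST, SOUTH, EAST, NORTH"""
--     walls_proprieties: list[int] = [0, 0, 0, 0]
--     try:
--         cell = int(carac, 16)
--         for i in range(0, 4):
--             if cell & 1 == 1:
--                 walls_proprieties[3 - i] = 1
--             cell = cell >> 1
--         return walls_proprieties
--     except ValueError as e:
--         raise (e)
-- ===== SOURCE B (Python) =====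
-- def decode_cell(carac: str):
--     """Return a list with the four wall values
--     unpackable with WEST, SOUTH, EAST, NORTH"""
--     n = int(carac, 16) & 0xF
--     return [int(b) for b in format(n, '04b')]
-- ===== Notes on version B (the rewrite author's own statement) =====
-- stated objective: simpler
-- what changed: B replaces the mutate-a-prefilled-list shift/mask loop by masking the low four bits once and mapping int() over the four-digit binary string representation.
import Mathlib
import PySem

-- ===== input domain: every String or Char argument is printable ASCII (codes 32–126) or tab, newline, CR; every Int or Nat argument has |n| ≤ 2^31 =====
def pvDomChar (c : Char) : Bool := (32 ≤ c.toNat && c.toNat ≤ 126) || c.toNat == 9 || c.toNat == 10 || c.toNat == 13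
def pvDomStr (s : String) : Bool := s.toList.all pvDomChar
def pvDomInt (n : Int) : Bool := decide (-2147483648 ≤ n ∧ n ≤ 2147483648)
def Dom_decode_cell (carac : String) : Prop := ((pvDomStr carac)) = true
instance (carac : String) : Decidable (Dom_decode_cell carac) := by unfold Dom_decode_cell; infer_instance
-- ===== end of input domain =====

-- B masks the low four bits once and reads the four-digit binary string representation, instead of A's shift/mask loop mutating a prefilled list; objective: simpler.


-- ===== PORT A =====
def decode_cell (carac : String) : List Int :=
  match PySem.Int.ofStrBase? carac 16 with
  | none => []          -- int(carac, 16) raises ValueError (re-raised by A); excluded by Pre_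
  | some cell0 =>
    -- walls_proprieties = [0,0,0,0]; for i in range(0,4): if cell & 1 == 1: walls[3-i] = 1; cell >>= 1
    (((PySem.List.pyRange 0 4 1).foldl
      (fun (st : List Int × Int) i =>
        ((if PySem.Int.band st.2 1 = 1 then PySem.List.pySetD st.1 (3 - i) 1 else st.1),
         st.2 >>> (1 : Nat)))
      (([0, 0, 0, 0] : List Int), cell0))).1

-- ===== PORT B =====
-- format(n, '04b'), hand-ported: exact for 0 ≤ n < 16 (the only values B feeds it)
def pvFormat04b (n : Int) : List Char :=
  [(if PySem.Int.band (n >>> (3 : Nat)) 1 = 1 then '1' else '0'),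
   (if PySem.Int.band (n >>> (2 : Nat)) 1 = 1 then '1' else '0'),
   (if PySem.Int.band (n >>> (1 : Nat)) 1 = 1 then '1' else '0'),
   (if PySem.Int.band (n >>> (0 : Nat)) 1 = 1 then '1' else '0')]

def decode_cell_alt (carac : String) : List Int :=
  match PySem.Int.ofStrBase? carac 16 with
  | none => []          -- int(carac, 16) raises ValueError; excluded by Pre_
  | some v =>
    let n := PySem.Int.band v 15
    -- int(b) for a single binary digit char, hand-ported: exact on '0'/'1'
    (pvFormat04b n).map (fun b => if b = '1' then (1 : Int) else 0)

-- ===== PRECONDITION & SPEC =====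
-- Pre_ excludes exactly the strings that are not a valid base-16 int literal, where A re-raises the ValueError.
def Pre_decode_cell (carac : String) : Prop := (PySem.Int.ofStrBase? carac 16).isSome = true
instance (carac : String) : Decidable (Pre_decode_cell carac) := by unfold Pre_decode_cell; infer_instance
def pvWitness_decode_cell : String := "a"

def Spec_decode_cell (carac : String) (out : List Int) : Prop := out = decode_cell_alt carac
instance (carac : String) (out : List Int) : Decidable (Spec_decode_cell carac out) := by unfold Spec_decode_cell; infer_instance

-- ===== CLAIM (what is proved, stated in full; the proofs are below) =====
def Claim_equal_decode_cell : Prop := ∀ (carac : String), Dom_decode_cell carac → Pre_decode_cell carac → Spec_decode_cell carac (decode_cell carac)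

-- ===== LEMMAS AND PROOFS =====

-- Python's `v & 15` is `v mod 16` (two's-complement mask of the low four bits).
theorem pv_band15 (v : Int) : PySem.Int.band v 15 = v % 16 := by
  unfold PySem.Int.band
  by_cases h : 0 ≤ v
  · simp only [if_pos h, if_pos (by norm_num : (0:Int) ≤ 15)]
    have h1 : v.toNat &&& (15:Int).toNat = v.toNat % 16 := by
      have := Nat.and_two_pow_sub_one_eq_mod v.toNat 4
      simpa using this
    rw [h1]
    omega
  · simp only [if_neg h, if_pos (by norm_num : (0:Int) ≤ 15)]
    have h1 : (15:Int).toNat &&& (-v - 1).toNat = (-v - 1).toNat % 16 := by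
      rw [Nat.and_comm]
      have := Nat.and_two_pow_sub_one_eq_mod (-v - 1).toNat 4
      simpa using this
    rw [h1]
    omega

-- a bit test survives first masking with 15, for shifts below 4
theorem pv_bit_mask (v : Int) (k : Nat) (hk : k < 4) :
    (PySem.Int.band ((PySem.Int.band v 15) >>> k) 1 = 1) ↔ (PySem.Int.band (v >>> k) 1 = 1) := by
  rw [pv_band15, PySem.Int.band_one, PySem.Int.band_one,
      PySem.Int.mod_eq_emod_of_pos (by norm_num),
      PySem.Int.mod_eq_emod_of_pos (by norm_num),
      Int.shiftRight_eq_div_pow, Int.shiftRight_eq_div_pow]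
  interval_cases k <;> (try norm_num) <;> omega

-- ===== VERDICT (by name: the statement is the Claim_ definition above) =====
theorem decode_cell_spec : Claim_equal_decode_cell := by
  intro carac _ hpre
  unfold Pre_decode_cell at hpre
  cases h : PySem.Int.ofStrBase? carac 16 with
  | none => rw [h] at hpre; simp at hpre
  | some v =>
    unfold Spec_decode_cell decode_cell decode_cell_alt
    rw [h]
    have e0 := pv_bit_mask v 0 (by norm_num)
    have e1 := pv_bit_mask v 1 (by norm_num)
    have e2 := pv_bit_mask v 2 (by norm_num)
    have e3 := pv_bit_mask v 3 (by norm_num)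
    have hz : v >>> (0 : Nat) = v := by
      rw [Int.shiftRight_eq_div_pow]; norm_num
    rw [hz] at e0
    have hr : PySem.List.pyRange 0 4 1 = [0, 1, 2, 3] := by decide
    simp only [hr, List.foldl, pvFormat04b, List.map]
    have s2 : v >>> (1 : Nat) >>> (1 : Nat) = v >>> (2 : Nat) := by
      simp only [Int.shiftRight_eq_div_pow]; omega
    have s3 : v >>> (2 : Nat) >>> (1 : Nat) = v >>> (3 : Nat) := by
      simp only [Int.shiftRight_eq_div_pow]; omega
    rw [s2, s3]
    simp only [e0, e1, e2, e3]
    by_cases h3 : PySem.Int.band (v >>> (3 : Nat)) 1 = 1 <;>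
      by_cases h2 : PySem.Int.band (v >>> (2 : Nat)) 1 = 1 <;>
      by_cases h1 : PySem.Int.band (v >>> (1 : Nat)) 1 = 1 <;>
      by_cases h0 : PySem.Int.band v 1 = 1 <;>
      simp only [h3, h2, h1, h0, if_false, if_pos] <;> decide
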